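-- pv_equiv track=rewrite | github.com/oicr-gsi/configScanner | runConfigScanner.py | init_filters
-- ===== SOURCE A (Python) =====
-- def init_filters(prefs: dict, instance: str):
--     p_filters = {}
--     if isinstance(prefs, dict) and len(prefs) > 0:
--         for p in prefs.keys():
--             rule = 'include' if p == instance else 'exclude'
--             if rule in p_filters.keys():
--                 p_filters[rule].append(prefs[p])
--             else:
--                 p_filters[rule] = [prefs[p]]
--     return p_filters
-- ===== SOURCE B (Python) =====
-- def init_filters(prefs: dict, instance: str):
--     if not isinstance(prefs, dict) or not prefs:
--         return {}
--     inc = [v for k, v in prefs.items() if k == instance]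
--     exc = [v for k, v in prefs.items() if k != instance]
--     result = {}
--     if inc:
--         result['include'] = inc
--     if exc:
--         result['exclude'] = exc
--     return result
-- ===== Notes on version B (the rewrite author's own statement) =====
-- stated objective: simpler
-- what changed: Instead of a single pass that branches per key and mutates a growing dict, B computes the include and exclude value lists by two filtered passes and assembles the result dict conditionally (include first); Pre_ excludes duplicate-key lists (a Python dict cannot hold them) and inputs where both groups are nonempty but the first key is not the instance, where A's exclude-before-include key order is an accident of dict insertion order and either order is defensible.
import Mathlib
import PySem

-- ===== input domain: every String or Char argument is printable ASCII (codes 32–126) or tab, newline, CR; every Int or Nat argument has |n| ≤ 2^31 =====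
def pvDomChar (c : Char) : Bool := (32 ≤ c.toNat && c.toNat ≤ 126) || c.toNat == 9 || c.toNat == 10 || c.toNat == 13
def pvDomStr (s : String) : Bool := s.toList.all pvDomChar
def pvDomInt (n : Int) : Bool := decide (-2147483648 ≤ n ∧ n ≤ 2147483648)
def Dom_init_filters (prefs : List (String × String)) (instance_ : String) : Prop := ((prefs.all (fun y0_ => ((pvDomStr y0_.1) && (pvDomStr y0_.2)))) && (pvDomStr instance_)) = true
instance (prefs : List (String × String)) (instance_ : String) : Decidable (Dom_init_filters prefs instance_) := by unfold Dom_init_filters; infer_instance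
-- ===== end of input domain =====

-- B replaces A's per-key branching dict mutation by two filtered passes (include / exclude
-- values) and a conditional include-first assembly; simpler decomposition, same cost.


-- ===== PORT A =====
-- prefs is a dict (assoc list with distinct keys, see Pre_); iterating its keys and
-- looking each key up yields exactly the pairs in order, so the loop folds over the pairs.
def init_filters (prefs : List (String × String)) (instance_ : String) : List (String × List String) :=
  let p_filters : PySem.Dict String (List String) := PySem.Dict.empty
  let p_filters :=
    if prefs.length > 0 then
      prefs.foldl (fun d pv =>
        let rule := if pv.1 == instance_ then "include" else "exclude"
        if d.contains rule then
          d.insert rule (d.getD rule [] ++ [pv.2])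
        else
          d.insert rule [pv.2]) p_filters
    else p_filters
  p_filters.items

-- ===== PORT B =====
def init_filters_alt (prefs : List (String × String)) (instance_ : String) : List (String × List String) :=
  if prefs.isEmpty then []
  else
    let inc : List String := (prefs.filter (fun kv => kv.1 == instance_)).map Prod.snd
    let exc : List String := (prefs.filter (fun kv => kv.1 != instance_)).map Prod.snd
    let result : List (String × List String) := []
    let result := if !inc.isEmpty then result ++ [("include", inc)] else result
    let result := if !exc.isEmpty then result ++ [("exclude", exc)] else result
    result

-- ===== PRECONDITION & SPEC =====
-- Pre_ requires distinct keys (the list stands for a Python dict, which cannot hold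
-- duplicates) and excludes inputs where both groups are nonempty but the first key is not
-- the instance: there A's exclude-before-include key order is an accident of dict
-- insertion order and either order is defensible.
def Pre_init_filters (prefs : List (String × String)) (instance_ : String) : Prop :=
  (prefs.map Prod.fst).Nodup ∧
    (prefs.head?.map Prod.fst = some instance_ ∨ instance_ ∉ prefs.map Prod.fst)
instance (prefs : List (String × String)) (instance_ : String) : Decidable (Pre_init_filters prefs instance_) := by unfold Pre_init_filters; infer_instance

def pvWitness_init_filters : (List (String × String)) × String :=
  ([("alpha", "x"), ("beta", "y")], "alpha")

def Spec_init_filters (prefs : List (String × String)) (instance_ : String) (out : List (String × List String)) : Prop := out = init_filters_alt prefs instance_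
instance (prefs : List (String × String)) (instance_ : String) (out : List (String × List String)) : Decidable (Spec_init_filters prefs instance_ out) := by unfold Spec_init_filters; infer_instance

-- ===== CLAIM (what is proved, stated in full; the proofs are below) =====
def Claim_equal_init_filters : Prop := ∀ (prefs : List (String × String)) (instance_ : String), Dom_init_filters prefs instance_ → Pre_init_filters prefs instance_ → Spec_init_filters prefs instance_ (init_filters prefs instance_)

-- ===== LEMMAS AND PROOFS =====

-- The loop body of A's port, named for the proofs.
def pvStep (instance_ : String) (d : PySem.Dict String (List String)) (pv : String × String) :
    PySem.Dict String (List String) :=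
  let rule := if pv.1 == instance_ then "include" else "exclude"
  if d.contains rule then
    d.insert rule (d.getD rule [] ++ [pv.2])
  else
    d.insert rule [pv.2]

-- values grouped under each rule
def pvInc (instance_ : String) (xs : List (String × String)) : List String :=
  (xs.filter (fun kv => kv.1 == instance_)).map Prod.snd
def pvExc (instance_ : String) (xs : List (String × String)) : List String :=
  (xs.filter (fun kv => kv.1 != instance_)).map Prod.snd

-- the dict state A's loop builds: include-first iff b, empty groups absent
def pvAsm (b : Bool) (i e : List String) : List (String × List String) :=
  (if b then [("include", i), ("exclude", e)] else [("exclude", e), ("include", i)]).filter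
    (fun g => !g.2.isEmpty)

theorem pvInc_cons (instance_ : String) (p v : String) (xs : List (String × String)) :
    pvInc instance_ ((p, v) :: xs) =
      (if p == instance_ then [v] else []) ++ pvInc instance_ xs := by
  by_cases h : p = instance_ <;> simp [pvInc, h]

theorem pvExc_cons (instance_ : String) (p v : String) (xs : List (String × String)) :
    pvExc instance_ ((p, v) :: xs) =
      (if p == instance_ then [] else [v]) ++ pvExc instance_ xs := by
  by_cases h : p = instance_ <;> simp [pvExc, h]

-- once both groups are nonempty the state keeps its shape
theorem pvFold_both (instance_ : String) (xs : List (String × String)) :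
    ∀ (b : Bool) (i e : List String), i ≠ [] → e ≠ [] →
      xs.foldl (pvStep instance_) (PySem.Dict.mk (pvAsm b i e)) =
        PySem.Dict.mk (pvAsm b (i ++ pvInc instance_ xs) (e ++ pvExc instance_ xs)) := by
  induction xs with
  | nil => intro b i e _ _; simp [pvInc, pvExc]
  | cons pv t ih =>
    intro b i e hi he
    obtain ⟨p, v⟩ := pv
    have hstep : pvStep instance_ (PySem.Dict.mk (pvAsm b i e)) (p, v) =
        PySem.Dict.mk (pvAsm b (i ++ (if p == instance_ then [v] else []))
                              (e ++ (if p == instance_ then [] else [v]))) := by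
      by_cases hp : p = instance_ <;> cases b <;>
        simp [pvStep, pvAsm, hp, hi, he, PySem.Dict.contains, PySem.Dict.getD,
              PySem.Dict.get?, PySem.Dict.insert, PySem.Dict.items]
    rw [List.foldl_cons, hstep, ih]
    · rw [pvInc_cons, pvExc_cons]
      simp [List.append_assoc]
    · simp [hi]
    · simp [he]

-- state holding only an include group
theorem pvFold_inc (instance_ : String) (xs : List (String × String)) :
    ∀ (i : List String), i ≠ [] →
      xs.foldl (pvStep instance_) (PySem.Dict.mk [("include", i)]) =
        PySem.Dict.mk (pvAsm true (i ++ pvInc instance_ xs) (pvExc instance_ xs)) := by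
  induction xs with
  | nil => intro i hi; simp [pvInc, pvExc, pvAsm, hi]
  | cons pv t ih =>
    intro i hi
    obtain ⟨p, v⟩ := pv
    by_cases hp : p = instance_
    · have hstep : pvStep instance_ (PySem.Dict.mk [("include", i)]) (p, v) =
          PySem.Dict.mk [("include", i ++ [v])] := by
        simp [pvStep, hp, PySem.Dict.contains, PySem.Dict.getD, PySem.Dict.get?,
              PySem.Dict.insert, PySem.Dict.items]
      rw [List.foldl_cons, hstep, ih (i ++ [v]) (by simp)]
      rw [pvInc_cons, pvExc_cons]
      simp [hp, List.append_assoc]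
    · have hstep : pvStep instance_ (PySem.Dict.mk [("include", i)]) (p, v) =
          PySem.Dict.mk (pvAsm true i [v]) := by
        simp [pvStep, pvAsm, hp, hi, PySem.Dict.contains, PySem.Dict.getD,
              PySem.Dict.get?, PySem.Dict.insert, PySem.Dict.items]
      rw [List.foldl_cons, hstep, pvFold_both instance_ t true i [v] hi (by simp)]
      rw [pvInc_cons, pvExc_cons]
      simp [hp]

-- state holding only an exclude group
theorem pvFold_exc (instance_ : String) (xs : List (String × String)) :
    ∀ (e : List String), e ≠ [] →
      xs.foldl (pvStep instance_) (PySem.Dict.mk [("exclude", e)]) =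
        PySem.Dict.mk (pvAsm false (pvInc instance_ xs) (e ++ pvExc instance_ xs)) := by
  induction xs with
  | nil => intro e he; simp [pvInc, pvExc, pvAsm, he]
  | cons pv t ih =>
    intro e he
    obtain ⟨p, v⟩ := pv
    by_cases hp : p = instance_
    · have hstep : pvStep instance_ (PySem.Dict.mk [("exclude", e)]) (p, v) =
          PySem.Dict.mk (pvAsm false [v] e) := by
        simp [pvStep, pvAsm, hp, he, PySem.Dict.contains, PySem.Dict.getD,
              PySem.Dict.get?, PySem.Dict.insert, PySem.Dict.items]
      rw [List.foldl_cons, hstep, pvFold_both instance_ t false [v] e (by simp) he]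
      rw [pvInc_cons, pvExc_cons]
      simp [hp]
    · have hstep : pvStep instance_ (PySem.Dict.mk [("exclude", e)]) (p, v) =
          PySem.Dict.mk [("exclude", e ++ [v])] := by
        simp [pvStep, hp, PySem.Dict.contains, PySem.Dict.getD, PySem.Dict.get?,
              PySem.Dict.insert, PySem.Dict.items]
      rw [List.foldl_cons, hstep, ih (e ++ [v]) (by simp)]
      rw [pvInc_cons, pvExc_cons]
      simp [hp, List.append_assoc]

-- if instance_ is not among the keys of xs, the include group of xs is empty
theorem pvInc_nil_of_not_mem (instance_ : String) (xs : List (String × String))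
    (h : instance_ ∉ xs.map Prod.fst) : pvInc instance_ xs = [] := by
  simp only [pvInc, List.map_eq_nil_iff, List.filter_eq_nil_iff]
  intro kv hkv
  simp only [beq_iff_eq]
  intro hk
  exact h (hk ▸ List.mem_map_of_mem hkv)

-- ===== VERDICT (by name: the statement is the Claim_ definition above) =====
theorem init_filters_spec : Claim_equal_init_filters := by
  intro prefs instance_ _ hpre
  unfold Spec_init_filters init_filters init_filters_alt
  obtain ⟨hnd, hord⟩ := hpre
  cases prefs with
  | nil => simp [PySem.Dict.empty, PySem.Dict.items]
  | cons pv t =>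
    obtain ⟨p, v⟩ := pv
    simp only [List.map_cons, List.nodup_cons] at hnd
    have hfirst : pvStep instance_ PySem.Dict.empty (p, v) =
        PySem.Dict.mk [((if p == instance_ then "include" else "exclude"), [v])] := by
      simp [pvStep, PySem.Dict.empty, PySem.Dict.contains, PySem.Dict.insert,
            PySem.Dict.items]
    have hAeq : (((p, v) :: t).foldl
        (fun d pv => let rule := if pv.1 == instance_ then "include" else "exclude";
          if d.contains rule then d.insert rule (d.getD rule [] ++ [pv.2])
          else d.insert rule [pv.2]) PySem.Dict.empty) =
        (((p, v) :: t).foldl (pvStep instance_) PySem.Dict.empty) := rfl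
    show (if (((p, v) :: t).length > 0) then _ else _root_.PySem.Dict.empty).items = _
    simp only [List.length_cons, gt_iff_lt, Nat.succ_pos, if_true]
    rw [hAeq]
    by_cases hp : p = instance_
    · -- first key matches: A is include-first, like B
      have hA : (((p, v) :: t).foldl (pvStep instance_) PySem.Dict.empty).items =
          pvAsm true ([v] ++ pvInc instance_ t) (pvExc instance_ t) := by
        rw [List.foldl_cons, hfirst]
        simp only [hp, beq_self_eq_true, if_true]
        rw [pvFold_inc instance_ t [v] (by simp)]
      have hinc : pvInc instance_ t = [] :=
        pvInc_nil_of_not_mem instance_ t (hp ▸ hnd.1)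
      rw [hA, hinc]
      have hBinc : pvInc instance_ ((p, v) :: t) = [v] := by
        rw [pvInc_cons, hinc]; simp [hp]
      have hBexc : pvExc instance_ ((p, v) :: t) = pvExc instance_ t := by
        rw [pvExc_cons]; simp [hp]
      show _ = if _ then _ else _
      rw [show (((p, v) :: t).filter (fun kv => kv.1 == instance_)).map Prod.snd =
            pvInc instance_ ((p, v) :: t) from rfl,
          show (((p, v) :: t).filter (fun kv => kv.1 != instance_)).map Prod.snd =
            pvExc instance_ ((p, v) :: t) from rfl, hBinc, hBexc]
      by_cases he : pvExc instance_ t = [] <;> simp [pvAsm, he]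
    · -- first key differs: Pre_ forces instance_ not a key, so include is empty everywhere
      have hnm : instance_ ∉ List.map Prod.fst ((p, v) :: t) := by
        rcases hord with h | h
        · simp only [List.head?_cons, Option.map_some] at h
          exact absurd (Option.some.inj h) hp
        · exact h
      have hnmt : instance_ ∉ t.map Prod.fst := by
        intro hmem; exact hnm (by simp [hmem])
      have hinc : pvInc instance_ t = [] := pvInc_nil_of_not_mem instance_ t hnmt
      have hA : (((p, v) :: t).foldl (pvStep instance_) PySem.Dict.empty).items =
          pvAsm false (pvInc instance_ t) ([v] ++ pvExc instance_ t) := by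
        rw [List.foldl_cons, hfirst]
        simp only [beq_iff_eq, hp, if_false]
        rw [pvFold_exc instance_ t [v] (by simp)]
      rw [hA, hinc]
      have hBinc : pvInc instance_ ((p, v) :: t) = [] := by
        rw [pvInc_cons, hinc]; simp [hp]
      have hBexc : pvExc instance_ ((p, v) :: t) = [v] ++ pvExc instance_ t := by
        rw [pvExc_cons]; simp [hp]
      show _ = if _ then _ else _
      rw [show (((p, v) :: t).filter (fun kv => kv.1 == instance_)).map Prod.snd =
            pvInc instance_ ((p, v) :: t) from rfl,
          show (((p, v) :: t).filter (fun kv => kv.1 != instance_)).map Prod.snd =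
            pvExc instance_ ((p, v) :: t) from rfl, hBinc, hBexc]
      simp [pvAsm]
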